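-- pv_equiv track=rewrite | github.com/utkarshhhhhhhhh/IP_Assignment-2 | Ques. 2.py | course
-- ===== SOURCE A (Python) =====
-- def course(s):
--     alphabets = ""
--     if len(s)!=6 or not(s[0].isalnum()) or not(s[0].isupper()) or not(s[5].isdigit()) or not(s.isupper()):
--         return False
--     for val in s:
--             if val.isalpha():
--                 alphabets += val
--     if s.replace(alphabets,"") == s:
--         return False
--
--     return True
-- ===== SOURCE B (Python) =====
-- def course(s):
--     # Same format guard as before; the letters-contiguity test is done in one
--     # pass with a flag instead of building a letters string and using replace().
--     if len(s) != 6 or not s[0].isalnum() or not s[0].isupper() or not s[5].isdigit() or not s.isupper():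
--         return False
--     seen_non_letter = False
--     for ch in s:
--         if ch.isalpha():
--             if seen_non_letter:
--                 return False
--         else:
--             seen_non_letter = True
--     return True
-- ===== Notes on version B (the rewrite author's own statement) =====
-- stated objective: simpler
-- what changed: The letters-contiguity test (A builds the string of all letters and checks that s.replace of it by the empty string changes s) is replaced by a single left-to-right pass with a seen_non_letter flag that fails as soon as a letter appears after a non-letter; the format guard is unchanged.
import Mathlib
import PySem

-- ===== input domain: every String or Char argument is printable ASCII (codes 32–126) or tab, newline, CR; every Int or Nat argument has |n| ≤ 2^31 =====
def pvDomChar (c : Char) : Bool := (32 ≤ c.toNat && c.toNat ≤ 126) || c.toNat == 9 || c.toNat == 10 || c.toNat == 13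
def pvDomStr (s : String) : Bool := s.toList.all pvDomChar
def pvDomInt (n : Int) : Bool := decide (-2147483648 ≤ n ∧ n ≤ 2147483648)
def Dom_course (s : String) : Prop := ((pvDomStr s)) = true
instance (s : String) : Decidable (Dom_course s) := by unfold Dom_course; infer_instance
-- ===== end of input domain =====

-- B replaces A's build-a-letter-string-and-replace() contiguity test by a single
-- left-to-right pass with a seen-non-letter flag (objective: simpler).

-- str.isupper(): at least one cased character and no lowercase one — exact on the
-- ASCII domain, where the cased characters are exactly a-z and A-Z.
def pyStrIsupper (cs : List Char) : Bool :=
  cs.any (fun c => PySem.Chars.isupper c || PySem.Chars.islower c) &&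
  cs.all (fun c => !PySem.Chars.islower c)

-- ===== PORT A =====
-- s[0] / s[5]: evaluated only when the length-6 test passed (Python's `or` and
-- Lean's `||` both short-circuit), so the `.getD ' '` default is never used.
def course (s : String) : Bool :=
  let cs := s.toList
  let c0 := (PySem.List.pyGet? cs 0).getD ' '
  let c5 := (PySem.List.pyGet? cs 5).getD ' '
  if decide (cs.length ≠ 6) || !PySem.Chars.isalnum c0 || !PySem.Chars.isupper c0
      || !PySem.Chars.isdigit c5 || !pyStrIsupper cs then
    false
  else
    let alphabets := cs.foldl (fun acc c => if PySem.Chars.isalpha c then acc ++ [c] else acc) []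
    if PySem.Chars.replace cs alphabets [] = cs then false
    else true

-- ===== PORT B =====
-- the for-loop of Source B: `seen` is the seen_non_letter flag
def courseLoop : List Char → Bool → Bool
  | [], _ => true
  | c :: t, seen =>
    if PySem.Chars.isalpha c then
      if seen then false else courseLoop t seen
    else courseLoop t true

def course_alt (s : String) : Bool :=
  let cs := s.toList
  let c0 := (PySem.List.pyGet? cs 0).getD ' '
  let c5 := (PySem.List.pyGet? cs 5).getD ' '
  if decide (cs.length ≠ 6) || !PySem.Chars.isalnum c0 || !PySem.Chars.isupper c0
      || !PySem.Chars.isdigit c5 || !pyStrIsupper cs then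
    false
  else
    courseLoop cs false

-- ===== PRECONDITION & SPEC =====
def Spec_course (s : String) (out : Bool) : Prop := out = course_alt s
instance (s : String) (out : Bool) : Decidable (Spec_course s out) := by unfold Spec_course; infer_instance

-- ===== CLAIM (what is proved, stated in full; the proofs are below) =====
def Claim_equal_course : Prop := ∀ (s : String), Dom_course s → Spec_course s (course s)

-- ===== LEMMAS AND PROOFS =====

-- replace.go leaves the list unchanged when `old` occurs nowhere in it
theorem replace_go_of_not_infix (old : List Char) (l : List Char) : ∀ (fuel : Nat) (acc : List Char),
    l.length ≤ fuel → ¬ old <:+: l →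
    PySem.Chars.replace.go old [] fuel l acc = acc.reverse ++ l := by
  induction l with
  | nil =>
    intro fuel acc _ _
    cases fuel <;> simp [PySem.Chars.replace.go]
  | cons c t ih =>
    intro fuel acc hf h
    cases fuel with
    | zero => simp at hf
    | succ f =>
      have hpre : old.isPrefixOf (c :: t) = false := by
        by_contra hx
        exact h ((List.isPrefixOf_iff_prefix.mp (by revert hx; cases old.isPrefixOf (c :: t) <;> simp)).isInfix)
      have ht : ¬ old <:+: t := fun hx => h (List.infix_cons_iff.mpr (Or.inr hx))
      rw [PySem.Chars.replace.go, hpre]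
      simp only [Bool.false_eq_true, if_false]
      rw [ih f (c :: acc) (by simpa using hf) ht]
      simp

-- replace.go with empty replacement never grows the output
theorem replace_go_len_le (old : List Char) : ∀ (fuel : Nat) (l acc : List Char),
    (PySem.Chars.replace.go old [] fuel l acc).length ≤ acc.length + l.length := by
  intro fuel
  induction fuel with
  | zero => intro l acc; simp [PySem.Chars.replace.go]
  | succ f ih =>
    intro l acc
    cases l with
    | nil => simp [PySem.Chars.replace.go]
    | cons c t =>
      rw [PySem.Chars.replace.go]
      by_cases hp : old.isPrefixOf (c :: t) = true
      · rw [hp]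
        simp only [if_true, List.reverse_nil, List.nil_append]
        calc (PySem.Chars.replace.go old [] f (List.drop old.length (c :: t)) acc).length
            ≤ acc.length + (List.drop old.length (c :: t)).length := ih _ _
          _ ≤ acc.length + (c :: t).length := by simp [List.length_drop]
      · rw [Bool.eq_false_iff.mpr hp]
        simp only [Bool.false_eq_true, if_false]
        calc (PySem.Chars.replace.go old [] f t (c :: acc)).length
            ≤ (c :: acc).length + t.length := ih _ _
          _ ≤ acc.length + (c :: t).length := by simp; omega

-- replace.go with empty replacement strictly shrinks when `old` does occur
theorem replace_go_lt_of_infix (old : List Char) (hne : old ≠ []) : ∀ (l : List Char) (fuel : Nat) (acc : List Char),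
    l.length ≤ fuel → old <:+: l →
    (PySem.Chars.replace.go old [] fuel l acc).length < acc.length + l.length := by
  intro l
  induction l with
  | nil =>
    intro fuel acc _ h
    exact absurd (List.eq_nil_of_infix_nil h) hne
  | cons c t ih =>
    intro fuel acc hf h
    cases fuel with
    | zero => simp at hf
    | succ f =>
      rw [PySem.Chars.replace.go]
      by_cases hp : old.isPrefixOf (c :: t) = true
      · rw [hp]
        simp only [if_true, List.reverse_nil, List.nil_append]
        have hple : old.length ≤ (c :: t).length := (List.isPrefixOf_iff_prefix.mp hp).length_le
        have hpos : 0 < old.length := List.length_pos_iff.mpr hne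
        calc (PySem.Chars.replace.go old [] f (List.drop old.length (c :: t)) acc).length
            ≤ acc.length + (List.drop old.length (c :: t)).length := replace_go_len_le _ _ _ _
          _ < acc.length + (c :: t).length := by simp [List.length_drop]; omega
      · have hpf : old.isPrefixOf (c :: t) = false := Bool.eq_false_iff.mpr hp
        have ht : old <:+: t := by
          rcases List.infix_cons_iff.mp h with hx | hx
          · exact absurd (List.isPrefixOf_iff_prefix.mpr hx) hp
          · exact hx
        rw [hpf]
        simp only [Bool.false_eq_true, if_false]
        have := ih f (c :: acc) (by simpa using hf) ht
        simp only [List.length_cons] at this ⊢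
        omega

-- replace(s, old, "") is s itself exactly when `old` (nonempty) does not occur in s
theorem replace_eq_self_iff (s old : List Char) (hne : old ≠ []) :
    (PySem.Chars.replace s old [] = s ↔ ¬ old <:+: s) := by
  rw [PySem.Chars.replace]
  rw [List.isEmpty_eq_false_iff.mpr hne]
  simp only [Bool.false_eq_true, if_false]
  constructor
  · intro he h
    have := replace_go_lt_of_infix old hne s s.length [] le_rfl h
    rw [he] at this
    simp at this
  · intro h
    rw [replace_go_of_not_infix old s s.length [] le_rfl h]
    simp

-- B's flag loop with the flag set: succeeds iff no letter remains
theorem courseLoop_true (l : List Char) :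
    courseLoop l true = l.all (fun c => !PySem.Chars.isalpha c) := by
  induction l with
  | nil => rfl
  | cons c t ih =>
    by_cases hc : PySem.Chars.isalpha c = true <;> simp [courseLoop, hc, ih]

-- B's flag loop: succeeds iff no letter follows the leading letter block
theorem courseLoop_false (l : List Char) :
    courseLoop l false = (l.dropWhile PySem.Chars.isalpha).all (fun c => !PySem.Chars.isalpha c) := by
  induction l with
  | nil => rfl
  | cons c t ih =>
    by_cases hc : PySem.Chars.isalpha c = true
    · simp [courseLoop, hc, ih]
    · simp [courseLoop, hc, courseLoop_true]

-- A's contiguity test: for a string starting with a letter, the concatenation of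
-- all its letters occurs in it iff no letter follows the leading letter block
theorem infix_filter_iff (a : Char) (t : List Char) (ha : PySem.Chars.isalpha a = true) :
    ((a :: t).filter PySem.Chars.isalpha <:+: (a :: t) ↔
      ((a :: t).dropWhile PySem.Chars.isalpha).all (fun c => !PySem.Chars.isalpha c) = true) := by
  constructor
  · rintro ⟨u, v, huv⟩
    set p := PySem.Chars.isalpha
    set P := (a :: t).filter p with hP
    have hfilterP : P.filter p = P :=
      List.filter_eq_self.mpr (fun x hx => (List.mem_filter.mp (hP ▸ hx)).2)
    have hfil : P = u.filter p ++ P ++ v.filter p := by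
      conv_lhs => rw [hP, ← huv]
      rw [List.filter_append, List.filter_append, hfilterP]
    have hlen := congrArg List.length hfil
    simp only [List.length_append] at hlen
    have hu0 : u.filter p = [] := List.length_eq_zero_iff.mp (by omega)
    have hv0 : v.filter p = [] := List.length_eq_zero_iff.mp (by omega)
    have hvall : ∀ x ∈ v, ¬ p x = true := List.filter_eq_nil_iff.mp hv0
    have hu : u = [] := by
      cases u with
      | nil => rfl
      | cons x u' =>
        have hx : x = a := by
          have := congrArg (fun l => l.head?) huv
          simpa using this
        have : ¬ p x = true := List.filter_eq_nil_iff.mp hu0 x (by simp)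
        exact absurd (hx ▸ ha) this
    subst hu
    simp only [List.nil_append] at huv
    have hPall : ∀ x ∈ P, p x = true := fun x hx => (List.mem_filter.mp (hP ▸ hx)).2
    have hdw : (a :: t).dropWhile p = v.dropWhile p := by
      rw [← huv, List.dropWhile_append, List.isEmpty_iff.mpr (List.dropWhile_eq_nil_iff.mpr hPall)]
      simp
    rw [hdw]
    exact List.all_eq_true.mpr fun x hx => by
      simpa using hvall x ((List.dropWhile_sublist p).mem hx)
  · intro h
    set p := PySem.Chars.isalpha
    have hT : (a :: t).filter p = (a :: t).takeWhile p := by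
      conv_lhs => rw [← List.takeWhile_append_dropWhile (p := p) (l := a :: t)]
      rw [List.filter_append]
      rw [List.filter_eq_self.mpr (fun x hx => List.mem_takeWhile_imp hx)]
      rw [List.filter_eq_nil_iff.mpr (fun x hx => by simpa using List.all_eq_true.mp h x hx)]
      simp
    rw [hT]
    exact (List.takeWhile_prefix p).isInfix

-- ===== VERDICT (by name: the statement is the Claim_ definition above) =====
theorem course_spec : Claim_equal_course := by
  intro s _
  unfold Spec_course course course_alt
  simp only []
  set cs := s.toList with hcs
  by_cases hG : (decide (cs.length ≠ 6) || !PySem.Chars.isalnum ((PySem.List.pyGet? cs 0).getD ' ')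
      || !PySem.Chars.isupper ((PySem.List.pyGet? cs 0).getD ' ')
      || !PySem.Chars.isdigit ((PySem.List.pyGet? cs 5).getD ' ')
      || !pyStrIsupper cs) = true
  · rw [if_pos hG, if_pos hG]
  · rw [if_neg hG, if_neg hG]
    simp only [Bool.or_eq_true, Bool.not_eq_true', decide_eq_true_eq, not_or] at hG
    obtain ⟨⟨⟨⟨hlen, _⟩, hup⟩, _⟩, _⟩ := hG
    have hlen6 : cs.length = 6 := by omega
    cases hcs' : cs with
    | nil => rw [hcs'] at hlen6; simp at hlen6
    | cons a t =>
      rw [hcs'] at hup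
      have hc0 : (PySem.List.pyGet? (a :: t) 0).getD ' ' = a := by
        simp [PySem.List.pyGet?, PySem.List.pyIdx?]
      rw [hc0] at hup
      have ha : PySem.Chars.isalpha a = true := by
        simp [PySem.Chars.isalpha, hup]
      rw [PySem.List.foldl_append_if PySem.Chars.isalpha (fun c => c) (a :: t) []]
      simp only [List.nil_append, List.map_id_fun', id]
      have hPne : (a :: t).filter PySem.Chars.isalpha ≠ [] := fun he =>
        absurd ha (List.filter_eq_nil_iff.mp he a (by simp))
      rw [courseLoop_false]
      by_cases hin : (a :: t).filter PySem.Chars.isalpha <:+: (a :: t)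
      · rw [if_neg (fun he => ((replace_eq_self_iff _ _ hPne).mp he) hin)]
        exact ((infix_filter_iff a t ha).mp hin).symm
      · rw [if_pos ((replace_eq_self_iff _ _ hPne).mpr hin)]
        have : ¬ ((a :: t).dropWhile PySem.Chars.isalpha).all (fun c => !PySem.Chars.isalpha c) = true :=
          fun hx => hin ((infix_filter_iff a t ha).mpr hx)
        exact (Bool.eq_false_iff.mpr this).symm
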